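-- pv_equiv track=rewrite | github.com/MarkKorg/-CS | ask12.py | max_0_sequence
-- ===== SOURCE A (Python) =====
-- def max_0_sequence(sequence):
--     sum = 0
--     max = 0
--     flag = False
--     for i in sequence:
--         if i == "0":
--             flag = True
--             sum += 1
--         if flag and i == "1":
--             flag = False
--             if sum > max:
--                 max = sum
--             sum = 0
--     return max
-- ===== SOURCE B (Python) =====
-- def max_0_sequence(sequence):
--     parts = "".join(x for x in sequence if x in ("0", "1")).split("1")
--     return max(map(len, parts[:-1]), default=0)
-- ===== Notes on version B (the rewrite author's own statement) =====
-- stated objective: idiomatic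
-- what changed: Replaces the running counter/flag loop by filtering the kept '0'/'1' elements, splitting the joined string on '1', and taking the maximum length of the pieces before the last (zeros not terminated by a '1' are thus ignored exactly as A does).
import Mathlib
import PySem

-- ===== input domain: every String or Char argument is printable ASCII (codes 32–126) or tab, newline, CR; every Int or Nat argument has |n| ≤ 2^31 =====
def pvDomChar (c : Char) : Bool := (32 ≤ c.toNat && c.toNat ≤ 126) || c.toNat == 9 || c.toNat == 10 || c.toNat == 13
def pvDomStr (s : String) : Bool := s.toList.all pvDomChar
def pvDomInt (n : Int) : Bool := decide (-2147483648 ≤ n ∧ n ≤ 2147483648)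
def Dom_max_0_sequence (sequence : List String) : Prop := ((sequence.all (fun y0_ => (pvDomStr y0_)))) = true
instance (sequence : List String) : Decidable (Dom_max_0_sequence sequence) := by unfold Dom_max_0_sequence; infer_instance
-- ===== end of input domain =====

-- B filters the kept "0"/"1" elements, joins them and splits on "1", returning the
-- maximal length of the pieces before the last — a split-based, more idiomatic
-- reformulation of A's running counter/flag loop (same cost).


-- ===== PORT A =====
-- one loop iteration of A (sum, max, flag)
def pvStepA (st : Int × Int × Bool) (i : String) : Int × Int × Bool :=
  let sum := st.1; let mx := st.2.1; let flag := st.2.2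
  let p := if i == "0" then (sum + 1, true) else (sum, flag)
  if p.2 && (i == "1") then (0, if p.1 > mx then p.1 else mx, false)
  else (p.1, mx, p.2)

def max_0_sequence (sequence : List String) : Int :=
  (sequence.foldl pvStepA ((0 : Int), (0 : Int), false)).2.1

-- ===== PORT B =====
def max_0_sequence_alt (sequence : List String) : Int :=
  let kept := sequence.filter (fun x => x == "0" || x == "1")
  let parts := PySem.Chars.splitOn (PySem.Chars.join [] (kept.map String.toList)) ['1']
  PySem.List.maxD (parts.dropLast.map (fun p => (p.length : Int))) id 0

-- ===== PRECONDITION & SPEC =====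
def Spec_max_0_sequence (sequence : List String) (out : Int) : Prop := out = max_0_sequence_alt sequence
instance (sequence : List String) (out : Int) : Decidable (Spec_max_0_sequence sequence out) := by unfold Spec_max_0_sequence; infer_instance

-- ===== CLAIM (what is proved, stated in full; the proofs are below) =====
def Claim_equal_max_0_sequence : Prop := ∀ (sequence : List String), Dom_max_0_sequence sequence → Spec_max_0_sequence sequence (max_0_sequence sequence)

-- ===== LEMMAS AND PROOFS =====

-- structural form of splitOn with separator ['1']
def pvSp : List Char → List Char → List (List Char)
  | [], cur => [cur.reverse]
  | c :: rest, cur => if c = '1' then cur.reverse :: pvSp rest [] else pvSp rest (c :: cur)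

theorem pvSp_ne_nil (cs cur : List Char) : pvSp cs cur ≠ [] := by
  induction cs generalizing cur with
  | nil => simp [pvSp]
  | cons c rest ih => by_cases h : c = '1' <;> simp [pvSp, h, ih]

theorem pvGo_eq_sp (fuel : Nat) (l cur : List Char) (acc : List (List Char))
    (h : l.length < fuel) :
    PySem.Chars.splitOn.go ['1'] fuel l cur acc = acc.reverse ++ pvSp l cur := by
  induction fuel generalizing l cur acc with
  | zero => omega
  | succ fuel ih =>
    cases l with
    | nil => simp [PySem.Chars.splitOn.go, pvSp]
    | cons c rest =>
      by_cases hc : c = '1'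
      · subst hc
        rw [show PySem.Chars.splitOn.go ['1'] (fuel+1) ('1' :: rest) cur acc
              = PySem.Chars.splitOn.go ['1'] fuel rest [] (cur.reverse :: acc) by
            simp [PySem.Chars.splitOn.go, List.isPrefixOf]]
        rw [ih rest [] (cur.reverse :: acc) (by simpa using Nat.lt_of_succ_lt_succ h)]
        simp [pvSp]
      · rw [show PySem.Chars.splitOn.go ['1'] (fuel+1) (c :: rest) cur acc
              = PySem.Chars.splitOn.go ['1'] fuel rest (c :: cur) acc by
            simp [PySem.Chars.splitOn.go, List.isPrefixOf]
            intro h; exact absurd h.symm hc]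
        rw [ih rest (c :: cur) acc (by simpa using Nat.lt_of_succ_lt_succ h)]
        simp [pvSp, hc]

theorem pvSplitOn_eq_sp (cs : List Char) :
    PySem.Chars.splitOn cs ['1'] = pvSp cs [] := by
  rw [PySem.Chars.splitOn, pvGo_eq_sp (cs.length + 1) cs [] [] (by omega)]
  simp

-- A's step ignores elements other than "0" and "1"
theorem pvStepA_skip (st : Int × Int × Bool) (x : String)
    (h0 : x ≠ "0") (h1 : x ≠ "1") : pvStepA st x = st := by
  simp [pvStepA, h0, h1]

theorem pvFoldA_filter (seq : List String) (st : Int × Int × Bool) :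
    seq.foldl pvStepA st = (seq.filter (fun x => x == "0" || x == "1")).foldl pvStepA st := by
  induction seq generalizing st with
  | nil => rfl
  | cons x rest ih =>
    by_cases h0 : x = "0"
    · simp [h0, List.foldl, ih]
    · by_cases h1 : x = "1"
      · simp [h1, List.foldl, ih]
      · have hb : (x == "0" || x == "1") = false := by simp [h0, h1]
        simp [List.foldl, hb, pvStepA_skip st x h0 h1, ih]

-- intercalating with the empty separator is flatten
theorem pvJoin_nil (l : List (List Char)) : PySem.Chars.join [] l = l.flatten := by
  rw [PySem.Chars.join, List.intercalate]
  induction l with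
  | nil => rfl
  | cons a t ih =>
    cases t with
    | nil => simp [List.intersperse]
    | cons b t' => simpa [List.intersperse] using ih

-- the central loop invariant: A's fold from state (|cur|, mx, cur ≠ []) computes the
-- max of mx with the lengths of the zero-runs that pvSp closes (all but the last piece)
theorem pvKey (ks : List String) (cur : List Char) (mx : Int) (flag : Bool)
    (hks : ∀ x ∈ ks, x = "0" ∨ x = "1") (hmx : 0 ≤ mx)
    (hflag : flag = !cur.isEmpty) :
    (ks.foldl pvStepA ((cur.length : Int), mx, flag)).2.1
      = ((pvSp ((ks.map String.toList).flatten) cur).dropLast.map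
          (fun p => (p.length : Int))).foldl (fun a b => max a b) mx := by
  induction ks generalizing cur mx flag with
  | nil => simp [pvSp]
  | cons x rest ih =>
    rcases hks x (by simp) with hx | hx
    · subst hx
      have : pvStepA ((cur.length : Int), mx, flag) "0"
          = (((('0' :: cur).length : Nat) : Int), mx, true) := by
        simp [pvStepA]
      rw [List.foldl_cons, this,
          ih ('0' :: cur) mx true (fun y hy => hks y (by simp [hy])) hmx (by simp)]
      simp [pvSp]
    · subst hx
      by_cases hc : cur = []
      · subst hc
        have : pvStepA ((0 : Int), mx, flag) "1" = ((0 : Int), mx, false) := by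
          simp [hflag, pvStepA]
        rw [show ((([] : List Char).length : Int), mx, flag) = ((0:Int), mx, flag) by simp,
            List.foldl_cons, this,
            show ((0:Int), mx, false) = ((([] : List Char).length : Int), mx, false) by simp,
            ih [] mx false (fun y hy => hks y (by simp [hy])) hmx (by simp)]
        have hne := pvSp_ne_nil ((rest.map String.toList).flatten) []
        cases hsp : pvSp ((rest.map String.toList).flatten) [] with
        | nil => exact absurd hsp hne
        | cons p ps =>
          simp [pvSp, hsp, max_eq_left hmx]
      · have hcur : cur.isEmpty = false := by simpa using hc
        have : pvStepA ((cur.length : Int), mx, flag) "1"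
            = ((0 : Int), max mx (cur.length : Int), false) := by
          simp [hflag, hcur, pvStepA]
          by_cases h : mx < (cur.length : Int)
          · simp [h, max_eq_right (le_of_lt h)]
          · simp [h, max_eq_left (not_lt.mp h)]
        rw [List.foldl_cons, this,
            show ((0:Int), max mx (cur.length : Int), false)
               = ((([] : List Char).length : Int), max mx (cur.length : Int), false) by simp,
            ih [] (max mx (cur.length : Int)) false (fun y hy => hks y (by simp [hy]))
              (le_trans hmx (le_max_left _ _)) (by simp)]
        have hne := pvSp_ne_nil ((rest.map String.toList).flatten) []
        cases hsp : pvSp ((rest.map String.toList).flatten) [] with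
        | nil => exact absurd hsp hne
        | cons p ps => simp [pvSp, hsp]

-- maxD over a list of nonnegative ints with default 0 is foldl max 0
theorem pvMaxD_cons (y z : Int) (t : List Int) :
    PySem.List.maxD (y :: z :: t) id 0 = PySem.List.maxD (max y z :: t) id 0 := by
  by_cases h : y < z
  · simp [PySem.List.maxD, PySem.List.max?, h, max_eq_right (le_of_lt h)]
  · simp [PySem.List.maxD, PySem.List.max?, h, max_eq_left (not_lt.mp h)]

theorem pvMaxD_foldl (t : List Int) : ∀ y : Int,
    PySem.List.maxD (y :: t) id 0 = t.foldl (fun a b => max a b) y := by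
  induction t with
  | nil => intro y; simp [PySem.List.maxD, PySem.List.max?]
  | cons z t ih =>
    intro y
    rw [pvMaxD_cons, ih (max y z)]
    simp [List.foldl_cons]

theorem pvMaxD_eq_foldl (ys : List Int) (h : ∀ y ∈ ys, 0 ≤ y) :
    PySem.List.maxD ys id 0 = ys.foldl (fun a b => max a b) 0 := by
  cases ys with
  | nil => rfl
  | cons y t =>
    have hy : 0 ≤ y := h y (by simp)
    rw [pvMaxD_foldl, List.foldl_cons, max_eq_right hy]

theorem pvSp_len_nonneg (cs cur : List Char) :
    ∀ y ∈ (pvSp cs cur).dropLast.map (fun p => ((p.length : Nat) : Int)), 0 ≤ y := by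
  intro y hy
  rcases List.mem_map.mp hy with ⟨p, _, rfl⟩
  positivity

-- ===== VERDICT (by name: the statement is the Claim_ definition above) =====
theorem max_0_sequence_spec : Claim_equal_max_0_sequence := by
  intro seq _
  unfold Spec_max_0_sequence max_0_sequence
  have hB : max_0_sequence_alt seq
      = PySem.List.maxD (((PySem.Chars.splitOn (PySem.Chars.join []
          ((seq.filter (fun x => x == "0" || x == "1")).map String.toList)) ['1']).dropLast).map
            (fun p => (p.length : Int))) id 0 := rfl
  rw [pvFoldA_filter, hB, pvJoin_nil, pvSplitOn_eq_sp,
      pvMaxD_eq_foldl _ (pvSp_len_nonneg _ _)]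
  have := pvKey (seq.filter (fun x => x == "0" || x == "1")) [] 0 false
    (fun x hx => by
      have := List.of_mem_filter hx
      rcases Bool.or_eq_true_iff.mp this with h | h
      · exact Or.inl (by simpa using h)
      · exact Or.inr (by simpa using h))
    le_rfl (by simp)
  simpa using this
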